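-- pv_equiv track=rewrite | github.com/openstack/networking-bgpvpn | networking_bgpvpn/osc/bgpvpn.py | _get_attr_names
-- ===== SOURCE A (Python) =====
-- _columns_map = (
--     ('ID', 'id'),
--     ('Project ID', 'tenant_id'),
--     ('Name', 'name'),
--     ('Type', 'type'),
--     ('Route Targets', 'route_targets'),
--     ('Import Targets', 'import_targets'),
--     ('Export Targets', 'export_targets'),
--     ('Route Distinguishers', 'route_distinguishers'),
--     ('Associated Networks', 'networks'),
--     ('Associated Routers', 'routers'),
-- )
--
-- def _get_attr_names(resources):
--     attr_names = []
--     for dummy_header, attr_name in _columns_map: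
--         for resource in resources:
--             if resource.get(attr_name, None):
--                 attr_names.append(attr_name)
--                 break
--     return attr_names
-- ===== SOURCE B (Python) =====
-- _columns_map = (
--     ('ID', 'id'),
--     ('Project ID', 'tenant_id'),
--     ('Name', 'name'),
--     ('Type', 'type'),
--     ('Route Targets', 'route_targets'),
--     ('Import Targets', 'import_targets'),
--     ('Export Targets', 'export_targets'),
--     ('Route Distinguishers', 'route_distinguishers'),
--     ('Associated Networks', 'networks'),
--     ('Associated Routers', 'routers'),
-- )
--
-- def _get_attr_names(resources):
--     present = set()
--     for resource in resources:
--         for key, val in resource.items():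
--             if val:
--                 present.add(key)
--     return [attr for _dummy, attr in _columns_map if attr in present]
-- ===== Notes on version B (the rewrite author's own statement) =====
-- stated objective: simpler
-- what changed: A rescans the whole resource list once per column (10 passes with an inner break); B makes one pass over the resources collecting the set of keys with truthy values, then filters _columns_map in order against that set.
import Mathlib
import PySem

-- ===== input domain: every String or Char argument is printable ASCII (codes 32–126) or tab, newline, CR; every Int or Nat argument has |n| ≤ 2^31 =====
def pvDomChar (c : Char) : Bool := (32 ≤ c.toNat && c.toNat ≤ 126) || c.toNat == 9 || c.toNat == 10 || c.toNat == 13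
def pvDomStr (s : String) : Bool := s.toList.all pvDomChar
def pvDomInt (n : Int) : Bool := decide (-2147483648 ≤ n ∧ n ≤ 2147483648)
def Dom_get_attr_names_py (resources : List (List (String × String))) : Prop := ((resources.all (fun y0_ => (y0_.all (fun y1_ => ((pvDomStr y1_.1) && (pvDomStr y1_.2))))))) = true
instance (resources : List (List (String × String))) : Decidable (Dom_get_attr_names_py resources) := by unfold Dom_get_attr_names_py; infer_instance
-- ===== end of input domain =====

-- B replaces A's per-column rescans of the resource list by one pass building the set of
-- truthy-valued keys followed by one ordered filter of _columns_map (return value only).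

def pvColumnsMap : List (String × String) :=
  [("ID", "id"), ("Project ID", "tenant_id"), ("Name", "name"), ("Type", "type"),
   ("Route Targets", "route_targets"), ("Import Targets", "import_targets"),
   ("Export Targets", "export_targets"), ("Route Distinguishers", "route_distinguishers"),
   ("Associated Networks", "networks"), ("Associated Routers", "routers")]

-- ===== PORT A =====
-- for each column: scan resources, append attr_name on the first truthy hit (break = List.any)
def get_attr_names_py (resources : List (List (String × String))) : List String :=
  pvColumnsMap.foldl
    (fun attr_names c =>
      if resources.any (fun resource => (PySem.Dict.ofList resource).getD c.2 "" != "") then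
        attr_names ++ [c.2]
      else attr_names)
    []

-- ===== PORT B =====
-- one pass: collect the keys mapped to a truthy value into a set
def pvPresent (resources : List (List (String × String))) : PySem.Set String :=
  resources.foldl
    (fun present resource =>
      (PySem.Dict.ofList resource).items.foldl
        (fun present kv => if kv.2 != "" then PySem.Set.add present kv.1 else present)
        present)
    PySem.Set.empty

def get_attr_names_py_alt (resources : List (List (String × String))) : List String :=
  (pvColumnsMap.filter (fun c => PySem.Set.contains (pvPresent resources) c.2)).map (·.2)

-- ===== PRECONDITION & SPEC =====
def Spec_get_attr_names_py (resources : List (List (String × String))) (out : List String) : Prop := out = get_attr_names_py_alt resources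
instance (resources : List (List (String × String))) (out : List String) : Decidable (Spec_get_attr_names_py resources out) := by unfold Spec_get_attr_names_py; infer_instance

-- ===== CLAIM (what is proved, stated in full; the proofs are below) =====
def Claim_equal_get_attr_names_py : Prop := ∀ (resources : List (List (String × String))), Dom_get_attr_names_py resources → Spec_get_attr_names_py resources (get_attr_names_py resources)

-- ===== LEMMAS AND PROOFS =====

-- membership in the inner set-building fold over one resource's items
theorem pv_mem_inner (items : List (String × String)) (s : PySem.Set String) (k : String) :
    (k ∈ items.foldl (fun present kv => if kv.2 != "" then PySem.Set.add present kv.1 else present) s)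
      ↔ k ∈ s ∨ ∃ kv ∈ items, kv.2 ≠ "" ∧ kv.1 = k := by
  induction items generalizing s with
  | nil => simp
  | cons hd tl ih =>
    simp only [List.foldl_cons]
    by_cases h : hd.2 = ""
    · rw [if_neg (by simp [h]), ih]
      constructor
      · rintro (hs | ⟨kv, hm, hv, hk⟩)
        · exact Or.inl hs
        · exact Or.inr ⟨kv, List.mem_cons_of_mem _ hm, hv, hk⟩
      · rintro (hs | ⟨kv, hm, hv, hk⟩)
        · exact Or.inl hs
        · rcases List.mem_cons.mp hm with rfl | hm'
          · exact absurd h hv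
          · exact Or.inr ⟨kv, hm', hv, hk⟩
    · rw [if_pos (by simp [h]), ih]
      simp only [PySem.Set.mem_add]
      constructor
      · rintro ((hs | rfl) | ⟨kv, hm, hv, hk⟩)
        · exact Or.inl hs
        · exact Or.inr ⟨hd, List.mem_cons_self, h, rfl⟩
        · exact Or.inr ⟨kv, List.mem_cons_of_mem _ hm, hv, hk⟩
      · rintro (hs | ⟨kv, hm, hv, hk⟩)
        · exact Or.inl (Or.inl hs)
        · rcases List.mem_cons.mp hm with rfl | hm'
          · exact Or.inl (Or.inr hk.symm)
          · exact Or.inr ⟨kv, hm', hv, hk⟩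

-- the existence of a truthy item at key k is exactly a truthy dict lookup at k
theorem pv_items_getD (r : List (String × String)) (k : String) :
    (∃ kv ∈ (PySem.Dict.ofList r).items, kv.2 ≠ "" ∧ kv.1 = k)
      ↔ (PySem.Dict.ofList r).getD k "" ≠ "" := by
  constructor
  · rintro ⟨⟨k', v⟩, hmem, hv, rfl⟩
    rw [PySem.Dict.getD_of_mem_items _ hmem (PySem.Dict.nodup_keys_ofList r) ""]
    exact hv
  · intro h
    rcases hg : (PySem.Dict.ofList r).get? k with _ | v
    · rw [PySem.Dict.getD_eq_get?_getD, hg] at h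
      simp at h
    · refine ⟨(k, v), PySem.Dict.mem_items_of_get?_eq_some _ hg, ?_, rfl⟩
      rw [PySem.Dict.getD_eq_get?_getD, hg] at h
      simpa using h

-- membership in the present set = some resource has a truthy value at k
theorem pv_present_spec (resources : List (List (String × String))) (k : String) :
    PySem.Set.contains (pvPresent resources) k
      = resources.any (fun resource => (PySem.Dict.ofList resource).getD k "" != "") := by
  have main : ∀ (rs : List (List (String × String))) (s : PySem.Set String),
      (k ∈ rs.foldl (fun present resource =>
          (PySem.Dict.ofList resource).items.foldl
            (fun present kv => if kv.2 != "" then PySem.Set.add present kv.1 else present) present) s)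
        ↔ k ∈ s ∨ ∃ r ∈ rs, (PySem.Dict.ofList r).getD k "" ≠ "" := by
    intro rs
    induction rs with
    | nil => simp
    | cons hd tl ih =>
      intro s
      rw [List.foldl_cons, ih, pv_mem_inner, pv_items_getD]
      constructor
      · rintro ((hs | hh) | ⟨r, hr, hp⟩)
        · exact Or.inl hs
        · exact Or.inr ⟨hd, List.mem_cons_self, hh⟩
        · exact Or.inr ⟨r, List.mem_cons_of_mem _ hr, hp⟩
      · rintro (hs | ⟨r, hr, hp⟩)
        · exact Or.inl (Or.inl hs)
        · rcases List.mem_cons.mp hr with rfl | hr'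
          · exact Or.inl (Or.inr hp)
          · exact Or.inr ⟨r, hr', hp⟩
  rcases hb : resources.any (fun resource => (PySem.Dict.ofList resource).getD k "" != "") with _ | _
  · simp only [List.any_eq_false, bne_iff_ne, ne_eq, not_not] at hb
    have : ¬ k ∈ pvPresent resources := by
      rw [pvPresent, main]
      rintro (h | ⟨r, hr, hne⟩)
      · simp [PySem.Set.empty] at h
      · exact hne (hb r hr)
    simpa [PySem.Set.contains_iff] using this
  · simp only [List.any_eq_true, bne_iff_ne] at hb
    obtain ⟨r, hr, hne⟩ := hb
    have : k ∈ pvPresent resources := by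
      rw [pvPresent, main]; exact Or.inr ⟨r, hr, hne⟩
    simpa [PySem.Set.contains_iff] using this

-- A's append-fold over the columns is the filtered projection
theorem pv_foldl_filter (p : String × String → Bool) (cs : List (String × String)) (init : List String) :
    cs.foldl (fun acc c => if p c then acc ++ [c.2] else acc) init
      = init ++ (cs.filter p).map (·.2) := by
  induction cs generalizing init with
  | nil => simp
  | cons hd tl ih =>
    by_cases h : p hd
    · simp [h, ih]
    · simp [h, ih]

-- ===== VERDICT (by name: the statement is the Claim_ definition above) =====
theorem get_attr_names_py_spec : Claim_equal_get_attr_names_py := by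
  intro resources _
  unfold Spec_get_attr_names_py get_attr_names_py get_attr_names_py_alt
  rw [pv_foldl_filter]
  simp only [List.nil_append]
  congr 1
  apply List.filter_congr
  intro c _
  rw [pv_present_spec]
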